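-- pv_equiv track=rewrite | github.com/kousarraza/100-Days-of-Code_Zero_to_Hero | Day_21/Project_03/Project_03.py | count_articles
-- ===== SOURCE A (Python) =====
-- def count_articles(text):
--     articles = ['a', 'an', 'the']
--     article_count = {'a': 0, 'an': 0, 'the': 0}
--     words = text.lower().split()
--
--     for word in words:
--         if word in articles:
--             article_count[word] += 1
--
--     return article_count
-- ===== SOURCE B (Python) =====
-- def count_articles(text):
--     # Single character-level state machine: no word list is ever built.
--     a = an = the = 0
--     cur = ''
--     for ch in text.lower() + ' ':
--         if ch.isspace():
--             if cur == 'a':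
--                 a += 1
--             elif cur == 'an':
--                 an += 1
--             elif cur == 'the':
--                 the += 1
--             cur = ''
--         else:
--             cur += ch
--     return {'a': a, 'an': an, 'the': the}
-- ===== Notes on version B (the rewrite author's own statement) =====
-- stated objective: alternative
-- what changed: Replaces split-into-a-word-list-then-loop-with-dict-counters by a single character-level state machine over the lowercased text that accumulates the current word and bumps one of three counters at each whitespace boundary, never materialising the word list.
import Mathlib
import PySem

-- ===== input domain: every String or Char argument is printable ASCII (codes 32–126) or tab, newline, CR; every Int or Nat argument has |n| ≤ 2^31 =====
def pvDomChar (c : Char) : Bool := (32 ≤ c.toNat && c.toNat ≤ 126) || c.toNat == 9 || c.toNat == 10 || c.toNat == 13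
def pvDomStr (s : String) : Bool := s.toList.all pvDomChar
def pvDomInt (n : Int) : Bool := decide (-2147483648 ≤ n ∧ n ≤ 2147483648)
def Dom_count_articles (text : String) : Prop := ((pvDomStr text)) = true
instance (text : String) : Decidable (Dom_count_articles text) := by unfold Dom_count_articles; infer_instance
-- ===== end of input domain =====

-- B replaces A's split-into-a-word-list-then-loop by a single character-level
-- state machine that never materialises the word list (objective: alternative).

-- ===== PORT A =====
def count_articles (text : String) : List (String × Int) :=
  let articles : List String := ["a", "an", "the"]
  let article_count : PySem.Dict String Int :=
    PySem.Dict.ofList [("a", 0), ("an", 0), ("the", 0)]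
  let words := PySem.Str.split₀ (PySem.Str.lower text)
  let article_count :=
    words.foldl (fun d word =>
      if word ∈ articles then d.modify word 0 (· + 1) else d) article_count
  article_count.items

-- ===== PORT B =====
-- one step of Source B's loop body: flush the current word on whitespace, else extend it
def pvStepB (st : (Int × Int × Int) × List Char) (ch : Char) :
    (Int × Int × Int) × List Char :=
  if PySem.Chars.isspace ch then
    (if st.2 = ['a'] then (st.1.1 + 1, st.1.2.1, st.1.2.2)
     else if st.2 = ['a', 'n'] then (st.1.1, st.1.2.1 + 1, st.1.2.2)
     else if st.2 = ['t', 'h', 'e'] then (st.1.1, st.1.2.1, st.1.2.2 + 1)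
     else st.1, [])
  else (st.1, st.2 ++ [ch])

def count_articles_alt (text : String) : List (String × Int) :=
  let r := ((PySem.Str.lower text).toList ++ [' ']).foldl pvStepB ((0, 0, 0), ([] : List Char))
  [("a", r.1.1), ("an", r.1.2.1), ("the", r.1.2.2)]

-- ===== PRECONDITION & SPEC =====
def Spec_count_articles (text : String) (out : List (String × Int)) : Prop := out = count_articles_alt text
instance (text : String) (out : List (String × Int)) : Decidable (Spec_count_articles text out) := by unfold Spec_count_articles; infer_instance

-- ===== CLAIM (what is proved, stated in full; the proofs are below) =====
def Claim_equal_count_articles : Prop := ∀ (text : String), Dom_count_articles text → Spec_count_articles text (count_articles text)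

-- ===== LEMMAS AND PROOFS =====

-- A's loop body never changes the key list of the dict.
theorem pv_keys_loop (ws : List String) (d : PySem.Dict String Int)
    (hd : ∀ v ∈ (["a", "an", "the"] : List String), v ∈ d.keys) :
    (ws.foldl (fun d word =>
      if word ∈ (["a", "an", "the"] : List String) then d.modify word 0 (· + 1) else d) d).keys
    = d.keys := by
  induction ws generalizing d with
  | nil => rfl
  | cons w ws ih =>
      simp only [List.foldl_cons]
      split_ifs with h
      · have hc : d.contains w = true := (PySem.Dict.contains_iff_mem_keys d w).mpr (hd w h)
        have hk : (d.modify w 0 (· + 1)).keys = d.keys := by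
          simp [PySem.Dict.keys_modify, PySem.Dict.keys_insert_of_contains (h := hc)]
        rw [ih _ (by rw [hk]; exact hd), hk]
      · exact ih _ hd

-- For an article v, A's loop accumulates the count of v.
theorem pv_getD_loop (ws : List String) (d : PySem.Dict String Int) (v : String)
    (hv : v ∈ (["a", "an", "the"] : List String)) :
    (ws.foldl (fun d word =>
      if word ∈ (["a", "an", "the"] : List String) then d.modify word 0 (· + 1) else d) d).getD v 0
    = d.getD v 0 + ws.count v := by
  induction ws generalizing d with
  | nil => simp
  | cons w ws ih =>
      simp only [List.foldl_cons]
      rw [ih]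
      by_cases hw : w ∈ (["a", "an", "the"] : List String)
      · rw [if_pos hw, PySem.Dict.getD_modify]
        by_cases hvw : v = w
        · subst hvw
          simp only [List.count_cons]
          simp
          omega
        · rw [if_neg hvw]
          have : ¬ (w = v) := fun h => hvw h.symm
          simp only [List.count_cons]
          simp [this]
      · rw [if_neg hw]
        have hne : ¬ (w = v) := fun h => hw (h ▸ hv)
        simp only [List.count_cons]
        simp [hne]

-- split₀.go's accumulator is a prefix of the result.
theorem pv_go_acc (cs : List Char) : ∀ (cur : List Char) (accL : List (List Char)),
    PySem.Chars.split₀.go cs cur accL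
    = accL.reverse ++ PySem.Chars.split₀.go cs cur [] := by
  induction cs with
  | nil =>
      intro cur accL
      simp only [PySem.Chars.split₀.go]
      split_ifs <;> simp
  | cons c cs ih =>
      intro cur accL
      simp only [PySem.Chars.split₀.go]
      split_ifs with h1 h2
      · rw [ih [] accL]
      · rw [ih [] (cur.reverse :: accL), ih [] [cur.reverse]]; simp
      · exact ih _ accL

-- B's machine over cs ++ [' '] counts the articles among split₀'s words of cs.
theorem pv_run_spec (cs : List Char) : ∀ (t : Int × Int × Int) (cur : List Char),
    ((cs ++ [' ']).foldl pvStepB (t, cur)).1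
    = (t.1 + ((PySem.Chars.split₀.go cs cur.reverse []).count ['a'] : Int),
       t.2.1 + ((PySem.Chars.split₀.go cs cur.reverse []).count ['a', 'n'] : Int),
       t.2.2 + ((PySem.Chars.split₀.go cs cur.reverse []).count ['t', 'h', 'e'] : Int)) := by
  induction cs with
  | nil =>
      intro t cur
      obtain ⟨t1, t2, t3⟩ := t
      have hsp : PySem.Chars.isspace ' ' = true := by decide
      simp only [List.nil_append, List.foldl_cons, List.foldl_nil, pvStepB, hsp, if_true,
        PySem.Chars.split₀.go]
      by_cases h1 : cur = ['a']
      · subst h1; simp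
      · by_cases h2 : cur = ['a', 'n']
        · subst h2; simp
        · by_cases h3 : cur = ['t', 'h', 'e']
          · subst h3; simp
          · by_cases h0 : cur = []
            · subst h0; simp
            · have hne : cur.reverse.isEmpty = false := by
                simp [h0]
              simp [h1, h2, h3, hne]
  | cons c cs ih =>
      intro t cur
      obtain ⟨t1, t2, t3⟩ := t
      by_cases h : PySem.Chars.isspace c = true
      · simp only [List.cons_append, List.foldl_cons]
        have hstep : pvStepB ((t1, t2, t3), cur) c
            = ((if cur = ['a'] then (t1 + 1, t2, t3)
                else if cur = ['a', 'n'] then (t1, t2 + 1, t3)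
                else if cur = ['t', 'h', 'e'] then (t1, t2, t3 + 1)
                else (t1, t2, t3)), []) := by
          simp [pvStepB, h]
        rw [hstep, ih _ []]
        have hgo : PySem.Chars.split₀.go (c :: cs) cur.reverse []
            = (if cur = [] then [] else [cur]) ++ PySem.Chars.split₀.go cs [] [] := by
          simp only [PySem.Chars.split₀.go, h, if_true]
          by_cases h0 : cur = []
          · simp [h0]
          · have hne : cur.reverse.isEmpty = false := by simp [h0]
            rw [if_neg (by simp [hne]), pv_go_acc]
            simp [h0]
          
        rw [hgo]
        simp only [List.count_append, List.reverse_nil]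
        by_cases h1 : cur = ['a']
        · subst h1; simp; all_goals omega
        · by_cases h2 : cur = ['a', 'n']
          · subst h2; simp; all_goals omega
          · by_cases h3 : cur = ['t', 'h', 'e']
            · subst h3; simp; all_goals omega
            · by_cases h0 : cur = []
              · subst h0; simp [h1, h2, h3]
              · simp [h0, h1, h2, h3]
      · simp only [List.cons_append, List.foldl_cons]
        have hstep : pvStepB ((t1, t2, t3), cur) c = ((t1, t2, t3), cur ++ [c]) := by
          simp [pvStepB, h]
        rw [hstep, ih _ (cur ++ [c])]
        have hgo : PySem.Chars.split₀.go (c :: cs) cur.reverse []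
            = PySem.Chars.split₀.go cs (c :: cur.reverse) [] := by
          simp [PySem.Chars.split₀.go, h]
        rw [hgo]
        simp [List.reverse_append]

-- counting a word in a string list equals counting its char list after map toList
theorem pv_count_toList (ws : List String) (w : String) :
    (ws.map String.toList).count w.toList = ws.count w := by
  induction ws with
  | nil => simp
  | cons x xs ih =>
      simp only [List.map_cons, List.count_cons, ih]
      congr 1
      have hiff : (x.toList = w.toList) ↔ x = w := by
        constructor
        · intro hc
          have h2 := congrArg String.ofList hc
          simpa using h2
        · intro hc; rw [hc]
      simp [hiff]

-- ===== VERDICT (by name: the statement is the Claim_ definition above) =====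
theorem count_articles_spec : Claim_equal_count_articles := by
  intro text _
  unfold Spec_count_articles count_articles count_articles_alt
  simp only []
  set ws := PySem.Str.split₀ (PySem.Str.lower text) with hws
  set d0 : PySem.Dict String Int := PySem.Dict.ofList [("a", 0), ("an", 0), ("the", 0)] with hd0
  set r := ws.foldl (fun d word =>
    if word ∈ (["a", "an", "the"] : List String) then d.modify word 0 (· + 1) else d) d0 with hr
  have hkeys : r.keys = ["a", "an", "the"] := by
    rw [hr, pv_keys_loop _ _ (by rw [hd0]; decide)]; rw [hd0]; decide
  have hnd : r.keys.Nodup := by rw [hkeys]; decide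
  have hitems := PySem.Dict.items_eq_map_keys r hnd 0
  rw [hitems, hkeys]
  have ha := pv_getD_loop ws d0 "a" (by decide)
  have han := pv_getD_loop ws d0 "an" (by decide)
  have hthe := pv_getD_loop ws d0 "the" (by decide)
  rw [← hr] at ha han hthe
  simp only [List.map_cons, List.map_nil, ha, han, hthe]
  have g : d0.getD "a" 0 = 0 ∧ d0.getD "an" 0 = 0 ∧ d0.getD "the" 0 = 0 := by
    rw [hd0]; decide
  rw [g.1, g.2.1, g.2.2]
  -- B's side: evaluate the machine
  have hrun := pv_run_spec ((PySem.Str.lower text).toList) (0, 0, 0) []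
  have hsplit : PySem.Chars.split₀.go ((PySem.Str.lower text).toList) [] []
      = ws.map String.toList := by
    rw [hws, PySem.Str.split₀_map_toList]
    rfl
  simp only [List.reverse_nil] at hrun
  rw [hsplit] at hrun
  rw [hrun]
  have ca : (ws.map String.toList).count ['a'] = ws.count "a" := pv_count_toList ws "a"
  have can : (ws.map String.toList).count ['a', 'n'] = ws.count "an" := pv_count_toList ws "an"
  have cthe : (ws.map String.toList).count ['t', 'h', 'e'] = ws.count "the" := pv_count_toList ws "the"
  rw [ca, can, cthe]
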